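-- pv_equiv track=rewrite | github.com/naftifine/Introduction-to-AI-CO3061 | Homework/minesweeper_ai.py | _check_assignment_possible
-- ===== SOURCE A (Python) =====
-- from itertools import combinations
--
-- def _check_assignment_possible(cells, constraints, target_cell, is_mine):
--     """Check if assigning target_cell as mine/safe is consistent"""
--     # Filter constraints involving target cell
--     relevant_constraints = []
--     for cell_tuple, count in constraints:
--         if target_cell in cell_tuple:
--             relevant_constraints.append((cell_tuple, count))
--
--     # Get cells to try
--     cells_to_try = set()
--     for cell_tuple, _ in relevant_constraints:
--         cells_to_try.update(cell_tuple)
--     cells_to_try.discard(target_cell)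
--     cells_list = list(cells_to_try)
--
--     if len(cells_list) > 15:
--         return True  # Assume possible if too complex
--
--     # Try all combinations
--     for num_mines in range(len(cells_list) + 1):
--         for mine_combo in combinations(cells_list, num_mines):
--             mine_set = set(mine_combo)
--             if is_mine:
--                 mine_set.add(target_cell)
--
--             # Check if this assignment satisfies all relevant constraints
--             valid = True
--             for cell_tuple, count in relevant_constraints:
--                 mines_in_constraint = sum(1 for c in cell_tuple if c in mine_set)
--                 if mines_in_constraint != count:
--                     valid = False
--                     break
--
--             if valid:
--                 return True
--
--     return False
-- ===== SOURCE B (Python) =====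
-- def _check_assignment_possible(cells, constraints, target_cell, is_mine):
--     """Check if assigning target_cell as mine/safe is consistent (recursive backtracking)"""
--     relevant_constraints = [(t, c) for t, c in constraints if target_cell in t]
--
--     cells_to_try = set()
--     for t, _ in relevant_constraints:
--         cells_to_try.update(t)
--     cells_to_try.discard(target_cell)
--     cells_list = list(cells_to_try)
--
--     if len(cells_list) > 15:
--         return True  # Assume possible if too complex
--
--     def ok(mines):
--         for t, cnt in relevant_constraints:
--             if sum(1 for c in t if c in mines or (is_mine and c == target_cell)) != cnt:
--                 return False
--         return True
--
--     def rec(i, mines):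
--         if i == len(cells_list):
--             return ok(mines)
--         return rec(i + 1, mines + [cells_list[i]]) or rec(i + 1, mines)
--
--     return rec(0, [])
-- ===== Notes on version B (the rewrite author's own statement) =====
-- stated objective: alternative
-- what changed: Replaces the size-stratified itertools.combinations enumeration (all subsets by cardinality, rebuilding a set per combo) with recursive include/exclude backtracking over cells_list that extends one mine list and tests constraints at the leaves.
import Mathlib
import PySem

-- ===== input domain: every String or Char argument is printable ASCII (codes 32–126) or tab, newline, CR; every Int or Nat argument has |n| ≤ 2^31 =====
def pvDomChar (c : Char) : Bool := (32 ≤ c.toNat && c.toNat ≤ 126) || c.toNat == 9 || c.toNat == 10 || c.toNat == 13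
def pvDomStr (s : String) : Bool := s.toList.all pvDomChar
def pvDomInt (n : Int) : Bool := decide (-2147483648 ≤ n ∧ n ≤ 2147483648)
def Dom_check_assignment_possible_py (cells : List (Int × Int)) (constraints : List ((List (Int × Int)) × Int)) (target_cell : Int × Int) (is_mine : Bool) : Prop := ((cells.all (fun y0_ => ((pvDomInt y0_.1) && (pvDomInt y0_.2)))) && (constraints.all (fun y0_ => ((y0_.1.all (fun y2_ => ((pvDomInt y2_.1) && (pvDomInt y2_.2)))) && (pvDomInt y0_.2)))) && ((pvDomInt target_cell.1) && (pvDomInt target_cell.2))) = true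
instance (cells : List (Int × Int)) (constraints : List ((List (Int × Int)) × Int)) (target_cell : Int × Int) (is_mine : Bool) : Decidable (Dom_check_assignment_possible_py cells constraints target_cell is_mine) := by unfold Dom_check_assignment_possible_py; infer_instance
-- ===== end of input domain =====

-- B replaces the combinations-by-size subset enumeration with recursive include/exclude
-- backtracking over cells_list; same boolean result, similar cost (objective: alternative).


-- ===== PORT A =====
-- shared preprocessing (identical lines in Source A and Source B): the relevant constraints
-- and cells_list = list(set-of-their-cells minus target_cell)
def pvRelevant (constraints : List ((List (Int × Int)) × Int)) (target_cell : Int × Int) :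
    List ((List (Int × Int)) × Int) :=
  constraints.filter (fun p => p.1.contains target_cell)

def pvCellsList (constraints : List ((List (Int × Int)) × Int)) (target_cell : Int × Int) :
    List (Int × Int) :=
  PySem.Set.discard
    ((pvRelevant constraints target_cell).foldl (fun s p => PySem.Set.update s p.1) PySem.Set.empty)
    target_cell

-- port of A: for num_mines in range(n+1): for combo in combinations(cells_list, num_mines): …
-- (combinations(l, k) enumerated as the length-k sublists; the existential any is order-blind)
def check_assignment_possible_py (cells : List (Int × Int)) (constraints : List ((List (Int × Int)) × Int)) (target_cell : Int × Int) (is_mine : Bool) : Bool :=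
  let relevant := pvRelevant constraints target_cell
  let cellsList := pvCellsList constraints target_cell
  if cellsList.length > 15 then true
  else
    (List.range (cellsList.length + 1)).any (fun k =>
      (List.sublistsLen k cellsList).any (fun combo =>
        let mineSet := PySem.Set.ofList combo
        let mineSet := if is_mine then PySem.Set.add mineSet target_cell else mineSet
        relevant.all (fun p =>
          ((p.1.countP (fun c => mineSet.contains c) : Int) == p.2))))

-- ===== PORT B =====
-- leaf check: all relevant constraints exactly satisfied by the mine list
def pvOkB (relevant : List ((List (Int × Int)) × Int)) (target_cell : Int × Int)
    (is_mine : Bool) (mines : List (Int × Int)) : Bool :=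
  relevant.all (fun p =>
    ((p.1.countP (fun c => mines.contains c || (is_mine && c == target_cell)) : Int) == p.2))

-- rec(i, mines): include or exclude the next cell (structural recursion on the remaining cells)
def pvRecB (relevant : List ((List (Int × Int)) × Int)) (target_cell : Int × Int)
    (is_mine : Bool) : List (Int × Int) → List (Int × Int) → Bool
  | [], mines => pvOkB relevant target_cell is_mine mines
  | c :: rest, mines =>
      pvRecB relevant target_cell is_mine rest (mines ++ [c]) ||
      pvRecB relevant target_cell is_mine rest mines

def check_assignment_possible_py_alt (cells : List (Int × Int)) (constraints : List ((List (Int × Int)) × Int)) (target_cell : Int × Int) (is_mine : Bool) : Bool :=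
  let relevant := pvRelevant constraints target_cell
  let cellsList := pvCellsList constraints target_cell
  if cellsList.length > 15 then true
  else pvRecB relevant target_cell is_mine cellsList []

-- ===== PRECONDITION & SPEC =====
def Spec_check_assignment_possible_py (cells : List (Int × Int)) (constraints : List ((List (Int × Int)) × Int)) (target_cell : Int × Int) (is_mine : Bool) (out : Bool) : Prop := out = check_assignment_possible_py_alt cells constraints target_cell is_mine
instance (cells : List (Int × Int)) (constraints : List ((List (Int × Int)) × Int)) (target_cell : Int × Int) (is_mine : Bool) (out : Bool) : Decidable (Spec_check_assignment_possible_py cells constraints target_cell is_mine out) := by unfold Spec_check_assignment_possible_py; infer_instance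

-- ===== CLAIM (what is proved, stated in full; the proofs are below) =====
def Claim_equal_check_assignment_possible_py : Prop := ∀ (cells : List (Int × Int)) (constraints : List ((List (Int × Int)) × Int)) (target_cell : Int × Int) (is_mine : Bool), Dom_check_assignment_possible_py cells constraints target_cell is_mine → Spec_check_assignment_possible_py cells constraints target_cell is_mine (check_assignment_possible_py cells constraints target_cell is_mine)

-- ===== LEMMAS AND PROOFS =====

-- A's per-combo check equals B's leaf check on the same mine list
theorem checkA_eq_okB (relevant : List ((List (Int × Int)) × Int)) (target_cell : Int × Int)
    (is_mine : Bool) (combo : List (Int × Int)) :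
    (relevant.all (fun p =>
      ((p.1.countP (fun c =>
          (if is_mine then PySem.Set.add (PySem.Set.ofList combo) target_cell
           else PySem.Set.ofList combo).contains c) : Int) == p.2)))
    = pvOkB relevant target_cell is_mine combo := by
  unfold pvOkB
  congr 1
  funext p
  congr 2
  apply List.countP_congr
  intro c _
  rw [Bool.eq_iff_iff]
  rcases is_mine with _ | _ <;>
    simp [PySem.Set.mem_add, PySem.Set.mem_ofList]

-- backtracking returns true iff some sublist of the remaining cells satisfies the leaf check
theorem recB_iff (relevant : List ((List (Int × Int)) × Int)) (target_cell : Int × Int)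
    (is_mine : Bool) :
    ∀ (rest mines : List (Int × Int)),
      pvRecB relevant target_cell is_mine rest mines = true ↔
        ∃ l, l.Sublist rest ∧ pvOkB relevant target_cell is_mine (mines ++ l) = true := by
  intro rest
  induction rest with
  | nil =>
      intro mines
      simp [pvRecB]
  | cons c rest ih =>
      intro mines
      simp only [pvRecB, Bool.or_eq_true, ih]
      constructor
      · rintro (⟨l, hl, hok⟩ | ⟨l, hl, hok⟩)
        · exact ⟨c :: l, (hl.cons_cons c), by simpa using hok⟩
        · exact ⟨l, hl.cons c, hok⟩
      · rintro ⟨l, hl, hok⟩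
        rcases List.sublist_cons_iff.mp hl with h | ⟨r, rfl, hr⟩
        · exact Or.inr ⟨l, h, hok⟩
        · exact Or.inl ⟨r, hr, by simpa using hok⟩

-- A's stratified combination enumeration is the same existential over all sublists
theorem anyA_iff (L : List (Int × Int)) (q : List (Int × Int) → Bool) :
    ((List.range (L.length + 1)).any (fun k => (List.sublistsLen k L).any q)) = true ↔
      ∃ l, l.Sublist L ∧ q l = true := by
  simp only [List.any_eq_true, List.mem_range, List.mem_sublistsLen]
  constructor
  · rintro ⟨k, _, l, ⟨hsub, _⟩, hq⟩
    exact ⟨l, hsub, hq⟩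
  · rintro ⟨l, hsub, hq⟩
    exact ⟨l.length, Nat.lt_succ_of_le hsub.length_le, l, ⟨hsub, rfl⟩, hq⟩

-- ===== VERDICT (by name: the statement is the Claim_ definition above) =====
theorem check_assignment_possible_py_spec : Claim_equal_check_assignment_possible_py := by
  intro cells constraints target_cell is_mine _
  unfold Spec_check_assignment_possible_py
  dsimp only [check_assignment_possible_py, check_assignment_possible_py_alt]
  by_cases h : (pvCellsList constraints target_cell).length > 15
  · rw [if_pos h, if_pos h]
  · rw [if_neg h, if_neg h]
    rw [Bool.eq_iff_iff, anyA_iff, recB_iff]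
    constructor
    · rintro ⟨l, hl, hq⟩
      exact ⟨l, hl, by rw [List.nil_append, ← checkA_eq_okB]; exact hq⟩
    · rintro ⟨l, hl, hq⟩
      exact ⟨l, hl, by rw [checkA_eq_okB]; simpa using hq⟩
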